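-- pv_equiv track=rewrite | github.com/Celsuss/Advent-of-Code-2022 | day-six.py | getIndexOfFirstNRepeating
-- ===== SOURCE A (Python) =====
-- def isUnique(stack):
--     chars = set()
--     for c in stack:
--         if c in chars:
--             return False
--         chars.add(c)
--
--     return True
--
-- def getIndexOfFirstNRepeating(buffer_full, n):
--     buffer = buffer_full[:n]
--     for i in range(n, len(buffer_full)):
--         if isUnique(buffer):
--             return i
--
--         buffer = buffer[1:]
--         buffer = buffer + buffer_full[i]
--
--     return 0
-- ===== SOURCE B (Python) =====
-- def getIndexOfFirstNRepeating(buffer_full, n):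
--     last = {}   # last index at which each character was seen
--     start = 0   # smallest s such that buffer_full[s:i] has no repeat
--     for i, c in enumerate(buffer_full):
--         if i - start >= n:
--             return i
--         j = last.get(c, -1)
--         if j >= start:
--             start = j + 1
--         last[c] = i
--     return 0
-- ===== Notes on version B (the rewrite author's own statement) =====
-- stated objective: faster
-- what changed: Instead of re-scanning each length-n window with a fresh set, B makes one pass keeping each character's last-seen index and the start of the current repeat-free suffix, returning the first i whose repeat-free suffix reaches length n.
-- outside the precondition, e.g. on getIndexOfFirstNRepeating('abca', -2): A returns -2, B returns 0
import Mathlib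
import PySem

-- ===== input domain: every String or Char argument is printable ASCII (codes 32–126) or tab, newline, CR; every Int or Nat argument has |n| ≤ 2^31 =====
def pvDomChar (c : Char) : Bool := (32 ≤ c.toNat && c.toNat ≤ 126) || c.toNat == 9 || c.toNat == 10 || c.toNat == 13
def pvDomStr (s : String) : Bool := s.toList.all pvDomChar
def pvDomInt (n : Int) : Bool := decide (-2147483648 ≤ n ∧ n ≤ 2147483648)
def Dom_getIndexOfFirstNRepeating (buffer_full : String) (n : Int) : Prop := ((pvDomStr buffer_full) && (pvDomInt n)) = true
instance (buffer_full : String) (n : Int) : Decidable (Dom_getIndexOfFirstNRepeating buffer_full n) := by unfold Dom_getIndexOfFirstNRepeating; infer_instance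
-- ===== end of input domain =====

-- B replaces A's per-window set re-scan by a single pass that tracks each character's
-- last-seen index and the start of the current repeat-free suffix (objective: faster, one pass).

-- ===== PORT A =====
-- helper isUnique(stack): set scan with early return
def isUnique_aux : List Char → PySem.Set Char → Bool
  | [], _ => true
  | c :: cs, chars =>
    if PySem.Set.contains chars c then false
    else isUnique_aux cs (PySem.Set.add chars c)

def isUnique (stack : List Char) : Bool := isUnique_aux stack PySem.Set.empty

-- loop 'for i in range(n, len(buffer_full))' over the state 'buffer';
-- buffer_full[i] is always in range here (n ≤ i < len), so the pyGet? none case is unreachable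
def getIdxA_loop (bf : List Char) : List Int → List Char → Int
  | [], _ => 0
  | i :: is, buffer =>
    if isUnique buffer then i
    else getIdxA_loop bf is
      (PySem.List.slice buffer (some 1) none ++ ((PySem.List.pyGet? bf i).elim [] (fun c => [c])))

def getIndexOfFirstNRepeating (buffer_full : String) (n : Int) : Int :=
  let bf := buffer_full.toList
  getIdxA_loop bf (PySem.List.pyRange n (bf.length : Int) 1) (PySem.List.slice bf none (some n))

-- ===== PORT B =====
-- loop 'for i, c in enumerate(buffer_full)' with state (last, start)
def getIdxB_loop (n : Int) : List (Int × Char) → PySem.Dict Char Int → Int → Int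
  | [], _, _ => 0
  | (i, c) :: rest, last, start =>
    if n ≤ i - start then i
    else
      let j := PySem.Dict.getD last c (-1)
      let start' := if start ≤ j then j + 1 else start
      getIdxB_loop n rest (PySem.Dict.insert last c i) start'

def getIndexOfFirstNRepeating_alt (buffer_full : String) (n : Int) : Int :=
  getIdxB_loop n (PySem.List.enumerate buffer_full.toList 0) PySem.Dict.empty 0

-- ===== PRECONDITION & SPEC =====
-- Pre_ excludes negative n, which is outside the function's natural domain (n is a window
-- size); there A's negative-index wraparound returns accidental negative indices.
def Pre_getIndexOfFirstNRepeating (buffer_full : String) (n : Int) : Prop := 0 ≤ n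
instance (buffer_full : String) (n : Int) : Decidable (Pre_getIndexOfFirstNRepeating buffer_full n) := by unfold Pre_getIndexOfFirstNRepeating; infer_instance

def pvWitness_getIndexOfFirstNRepeating : String × Int := ("mjqjpqmgbljsphdztnvjfqwrcgsmlb", 4)

def Spec_getIndexOfFirstNRepeating (buffer_full : String) (n : Int) (out : Int) : Prop := out = getIndexOfFirstNRepeating_alt buffer_full n
instance (buffer_full : String) (n : Int) (out : Int) : Decidable (Spec_getIndexOfFirstNRepeating buffer_full n out) := by unfold Spec_getIndexOfFirstNRepeating; infer_instance

-- ===== CLAIM (what is proved, stated in full; the proofs are below) =====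
def Claim_equal_getIndexOfFirstNRepeating : Prop := ∀ (buffer_full : String) (n : Int), Dom_getIndexOfFirstNRepeating buffer_full n → Pre_getIndexOfFirstNRepeating buffer_full n → Spec_getIndexOfFirstNRepeating buffer_full n (getIndexOfFirstNRepeating buffer_full n)

-- ===== LEMMAS AND PROOFS =====

-- the window of the last m characters before index i
def pvWin (bf : List Char) (m i : Nat) : List Char := (bf.take i).drop (i - m)

-- common reference: first i ≥ m with a repeat-free window, scanned with explicit fuel
def pvSpec (bf : List Char) (m : Nat) : Nat → Nat → Int
  | 0, _ => 0
  | fuel+1, i => if m ≤ i ∧ (pvWin bf m i).Nodup then (i : Int) else pvSpec bf m fuel (i+1)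

-- 'last' maps each character to the index of its last occurrence in bf[:i]
def pvLastOk (bf : List Char) (i : Nat) (last : PySem.Dict Char Int) : Prop :=
  ∀ c : Char,
    (∀ v : Int, last.get? c = some v →
      ∃ k : Nat, v = (k : Int) ∧ k < i ∧ bf[k]? = some c ∧
        ∀ j : Nat, k < j → j < i → bf[j]? ≠ some c) ∧
    (last.get? c = none → ∀ j : Nat, j < i → bf[j]? ≠ some c)

-- 'start' is the least s with bf[s:i] repeat-free
def pvStartOk (bf : List Char) (i sn : Nat) : Prop :=
  sn ≤ i ∧ ((bf.take i).drop sn).Nodup ∧ ∀ s : Nat, s < sn → ¬ ((bf.take i).drop s).Nodup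

lemma pv_isUnique_aux_eq (xs : List Char) : ∀ (s : PySem.Set Char),
    isUnique_aux xs s = decide (xs.Nodup ∧ ∀ c ∈ xs, c ∉ s) := by
  induction xs with
  | nil => intro s; simp [isUnique_aux]
  | cons c cs ih =>
    intro s
    simp only [isUnique_aux, PySem.Set.contains]
    by_cases hc : c ∈ s
    · simp [hc]
    · rw [if_neg (by simpa using hc), ih]
      rw [decide_eq_decide]
      simp only [List.nodup_cons, List.mem_cons]
      constructor
      · rintro ⟨hn, hall⟩
        refine ⟨⟨fun hmem => ?_, hn⟩, ?_⟩
        · exact (hall c hmem) ((PySem.Set.mem_add s c c).mpr (Or.inr rfl))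
        · rintro x (rfl | hx)
          · exact hc
          · intro hxs; exact (hall x hx) ((PySem.Set.mem_add s c x).mpr (Or.inl hxs))
      · rintro ⟨⟨hcc, hn⟩, hall⟩
        refine ⟨hn, fun x hx hxadd => ?_⟩
        rcases (PySem.Set.mem_add s c x).mp hxadd with h | rfl
        · exact hall x (Or.inr hx) h
        · exact hcc hx

lemma pv_isUnique_eq (xs : List Char) : isUnique xs = decide xs.Nodup := by
  rw [isUnique, pv_isUnique_aux_eq]
  simp [PySem.Set.empty]

lemma pv_win_step (bf : List Char) (m i : Nat) (h1 : 1 ≤ m) (hmi : m ≤ i) (hiL : i < bf.length) :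
    (pvWin bf m i).tail ++ [bf[i]] = pvWin bf m (i+1) := by
  unfold pvWin
  rw [List.tail_drop, List.take_add_one, List.getElem?_eq_getElem hiL, List.drop_append]
  have hlen : (bf.take i).length = i := List.length_take_of_le (by omega)
  rw [hlen]
  have h2 : i + 1 - m = (i - m) + 1 := by omega
  have h3 : (i - m) + 1 - i = 0 := by omega
  rw [h2, h3]
  simp

lemma pv_A_loop (bf : List Char) (m : Nat) :
    ∀ (fuel i : Nat), bf.length - i = fuel → m ≤ i →
      getIdxA_loop bf (PySem.List.pyRange (i : Int) (bf.length : Int) 1) (pvWin bf m i) =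
        pvSpec bf m fuel i := by
  intro fuel
  induction fuel with
  | zero =>
    intro i hfi hmi
    rw [PySem.List.pyRange_one_eq_nil (by omega)]
    rfl
  | succ k ih =>
    intro i hfi hmi
    have hiL : i < bf.length := by omega
    rw [PySem.List.pyRange_one_cons (by exact_mod_cast hiL)]
    show (if isUnique (pvWin bf m i) then (i : Int)
      else getIdxA_loop bf (PySem.List.pyRange ((i : Int) + 1) (bf.length : Int) 1) _) = _
    rw [pv_isUnique_eq]
    by_cases hnd : (pvWin bf m i).Nodup
    · simp only [hnd, decide_true, if_true, pvSpec, hmi, true_and, if_true]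
    · simp only [hnd, decide_false, if_false, pvSpec, and_false, if_false]
      have hm1 : 1 ≤ m := by
        rcases Nat.eq_zero_or_pos m with rfl | h
        · exact absurd (by simp [pvWin]) hnd
        · exact h
      have hbuf : PySem.List.slice (pvWin bf m i) (some 1) none ++
          ((PySem.List.pyGet? bf (i : Int)).elim [] (fun c => [c])) = pvWin bf m (i+1) := by
        rw [PySem.List.slice_from_one, PySem.List.pyGet?_natCast, List.getElem?_eq_getElem hiL]
        exact pv_win_step bf m i hm1 hmi hiL
      rw [hbuf]
      have : ((i : Int) + 1) = ((i + 1 : Nat) : Int) := by push_cast; ring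
      rw [this]
      exact ih (i + 1) (by omega) (by omega)

lemma pv_spec_skip (bf : List Char) (m : Nat) :
    ∀ (fuel i : Nat), fuel = bf.length - i → i ≤ m →
      pvSpec bf m fuel i = pvSpec bf m (bf.length - m) m := by
  intro fuel
  induction fuel with
  | zero =>
    intro i hfi him
    rcases Nat.eq_or_lt_of_le him with rfl | hlt
    · rw [hfi]
    · have : bf.length - m = 0 := by omega
      rw [this]
      rfl
  | succ k ih =>
    intro i hfi him
    rcases Nat.eq_or_lt_of_le him with rfl | hlt
    · rw [hfi]
    · show (if m ≤ i ∧ (pvWin bf m i).Nodup then (i : Int) else pvSpec bf m k (i+1)) = _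
      rw [if_neg (by omega)]
      exact ih (i+1) (by omega) (by omega)

lemma pv_nodup_snoc (xs : List Char) (c : Char) : (xs ++ [c]).Nodup ↔ xs.Nodup ∧ c ∉ xs := by
  rw [List.nodup_append]
  constructor
  · rintro ⟨h1, _, h3⟩
    refine ⟨h1, fun hc => ?_⟩
    exact h3 c hc c (List.mem_singleton_self c) rfl
  · rintro ⟨h1, h2⟩
    refine ⟨h1, List.nodup_singleton c, fun a ha b hb => ?_⟩
    rw [List.mem_singleton] at hb
    subst hb
    exact fun heq => h2 (heq ▸ ha)

lemma pv_mem_dropTake_iff (bf : List Char) (s i : Nat) (hi : i ≤ bf.length) (c : Char) :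
    c ∈ (bf.take i).drop s ↔ ∃ p : Nat, s ≤ p ∧ p < i ∧ bf[p]? = some c := by
  constructor
  · intro hm
    obtain ⟨t, ht, heq⟩ := List.mem_iff_getElem.mp hm
    have hlen : ((bf.take i).drop s).length = i - s := by
      simp [List.length_drop, List.length_take]; omega
    have htlt : s + t < i := by omega
    refine ⟨s + t, by omega, htlt, ?_⟩
    rw [List.getElem?_eq_getElem (by omega)]
    rw [← heq, List.getElem_drop, List.getElem_take]
  · rintro ⟨p, hsp, hpi, hpc⟩
    have hplen : p < bf.length := by omega
    rw [List.getElem?_eq_getElem hplen] at hpc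
    have hbfp : bf[p] = c := by injection hpc
    refine List.mem_iff_getElem.mpr ⟨p - s, by simp [List.length_drop, List.length_take]; omega, ?_⟩
    rw [List.getElem_drop, List.getElem_take]
    have : s + (p - s) = p := by omega
    simp only [this, hbfp]

lemma pv_take_succ_drop (bf : List Char) (i s : Nat) (c : Char)
    (hiL : i < bf.length) (hci : bf[i] = c) (hs : s ≤ i) :
    (bf.take (i+1)).drop s = (bf.take i).drop s ++ [c] := by
  rw [List.take_add_one, List.getElem?_eq_getElem hiL, hci]
  rw [List.drop_append]
  have hlen : (bf.take i).length = i := List.length_take_of_le (by omega)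
  rw [hlen, show s - i = 0 by omega]
  rfl

lemma pv_cond_iff (bf : List Char) (m i sn : Nat) (hstart : pvStartOk bf i sn) :
    (m + sn ≤ i) ↔ (m ≤ i ∧ (pvWin bf m i).Nodup) := by
  obtain ⟨hsi, hnd, hmin⟩ := hstart
  constructor
  · intro h
    refine ⟨by omega, ?_⟩
    unfold pvWin
    have : (bf.take i).drop (i - m) = ((bf.take i).drop sn).drop (i - m - sn) := by
      rw [List.drop_drop, show sn + (i - m - sn) = i - m by omega]
    rw [this]
    exact hnd.sublist (List.drop_sublist _ _)
  · rintro ⟨hmi, hwnd⟩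
    by_contra h
    exact hmin (i - m) (by omega) hwnd

lemma pv_lastOk_step (bf : List Char) (i : Nat) (last : PySem.Dict Char Int) (c : Char)
    (hlast : pvLastOk bf i last) (hiL : i < bf.length) (hci : bf[i]? = some c) :
    pvLastOk bf (i+1) (PySem.Dict.insert last c (i : Int)) := by
  intro c'
  by_cases hcc : c' = c
  · subst hcc
    rw [PySem.Dict.get?_insert_self]
    constructor
    · intro v hv
      have hv' : v = (i : Int) := by
        have := hv
        injection this with h
        exact h.symm
      exact ⟨i, hv', by omega, hci, fun j h1 h2 => by omega⟩
    · intro hnone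
      cases hnone
  · rw [PySem.Dict.get?_insert_of_ne last (i : Int) hcc]
    constructor
    · intro v hv
      obtain ⟨k, hvk, hk, hkc, hmax⟩ := (hlast c').1 v hv
      refine ⟨k, hvk, by omega, hkc, fun j h1 h2 => ?_⟩
      rcases Nat.lt_or_ge j i with hj | hj
      · exact hmax j h1 hj
      · have : j = i := by omega
        subst this
        rw [hci]
        intro heq
        have : c = c' := by injection heq
        exact hcc this.symm
    · intro hnone j hj
      rcases Nat.lt_or_ge j i with hj' | hj'
      · exact (hlast c').2 hnone j hj'
      · have : j = i := by omega
        subst this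
        rw [hci]
        intro heq
        have : c = c' := by injection heq
        exact hcc this.symm

lemma pv_startOk_keep (bf : List Char) (i sn : Nat) (c : Char)
    (hstart : pvStartOk bf i sn) (hiL : i < bf.length) (hci : bf[i] = c)
    (hnotin : ∀ p : Nat, sn ≤ p → p < i → bf[p]? ≠ some c) :
    pvStartOk bf (i+1) sn := by
  obtain ⟨hsi, hnd, hmin⟩ := hstart
  refine ⟨by omega, ?_, ?_⟩
  · rw [pv_take_succ_drop bf i sn c hiL hci hsi, pv_nodup_snoc]
    refine ⟨hnd, fun hm => ?_⟩
    obtain ⟨p, hsp, hpi, hpc⟩ := (pv_mem_dropTake_iff bf sn i (by omega) c).mp hm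
    exact hnotin p hsp hpi hpc
  · intro s hs hn
    rw [pv_take_succ_drop bf i s c hiL hci (by omega), pv_nodup_snoc] at hn
    exact hmin s hs hn.1

lemma pv_startOk_move (bf : List Char) (i sn k : Nat) (c : Char)
    (hstart : pvStartOk bf i sn) (hiL : i < bf.length) (hci : bf[i] = c)
    (hsk : sn ≤ k) (hk : k < i) (hkc : bf[k]? = some c)
    (hmax : ∀ j : Nat, k < j → j < i → bf[j]? ≠ some c) :
    pvStartOk bf (i+1) (k+1) := by
  obtain ⟨hsi, hnd, hmin⟩ := hstart
  refine ⟨by omega, ?_, ?_⟩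
  · rw [pv_take_succ_drop bf i (k+1) c hiL hci (by omega), pv_nodup_snoc]
    constructor
    · have : (bf.take i).drop (k+1) = ((bf.take i).drop sn).drop (k+1-sn) := by
        rw [List.drop_drop, show sn + (k+1-sn) = k+1 by omega]
      rw [this]
      exact hnd.sublist (List.drop_sublist _ _)
    · intro hm
      obtain ⟨p, hsp, hpi, hpc⟩ := (pv_mem_dropTake_iff bf (k+1) i (by omega) c).mp hm
      exact hmax p (by omega) hpi hpc
  · intro s hs hn
    rcases Nat.lt_or_ge s sn with hssn | hssn
    · rw [pv_take_succ_drop bf i s c hiL hci (by omega), pv_nodup_snoc] at hn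
      exact hmin s hssn hn.1
    · rw [pv_take_succ_drop bf i s c hiL hci (by omega), pv_nodup_snoc] at hn
      exact hn.2 ((pv_mem_dropTake_iff bf s i (by omega) c).mpr ⟨k, by omega, hk, hkc⟩)

lemma pv_B_loop (bf : List Char) (m : Nat) :
    ∀ (rest : List Char) (i sn : Nat) (last : PySem.Dict Char Int),
      pvLastOk bf i last → pvStartOk bf i sn → bf.drop i = rest →
      getIdxB_loop (m : Int) (PySem.List.enumerate rest (i : Int)) last (sn : Int) =
        pvSpec bf m (bf.length - i) i := by
  intro rest
  induction rest with
  | nil =>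
    intro i sn last _ _ hdrop
    have hlen := congrArg List.length hdrop
    simp only [List.length_drop, List.length_nil] at hlen
    rw [PySem.List.enumerate_nil, show bf.length - i = 0 by omega]
    rfl
  | cons c rest ih =>
    intro i sn last hlast hstart hdrop
    have hlen := congrArg List.length hdrop
    simp only [List.length_drop, List.length_cons] at hlen
    have hiL : i < bf.length := by omega
    have hci : bf[i]? = some c := by
      have h0 : (bf.drop i)[0]? = some c := by rw [hdrop]; rfl
      rwa [List.getElem?_drop, Nat.add_zero] at h0
    have hbfi : bf[i] = c := by
      rw [List.getElem?_eq_getElem hiL] at hci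
      injection hci
    have hdropS : bf.drop (i+1) = rest := by
      rw [← List.drop_drop, hdrop]
      rfl
    rw [PySem.List.enumerate_cons]
    rw [show bf.length - i = (bf.length - (i+1)) + 1 by omega]
    simp only [getIdxB_loop, pvSpec]
    by_cases hcond : m + sn ≤ i
    · rw [if_pos (by omega : (m : Int) ≤ (i : Int) - (sn : Int)),
        if_pos ((pv_cond_iff bf m i sn hstart).mp hcond)]
    · rw [if_neg (by omega : ¬ (m : Int) ≤ (i : Int) - (sn : Int)),
        if_neg (fun h => hcond ((pv_cond_iff bf m i sn hstart).mpr h))]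
      rw [PySem.Dict.getD_eq_get?_getD]
      have hlast' := pv_lastOk_step bf i last c hlast hiL hci
      have hcast : (i : Int) + 1 = ((i + 1 : Nat) : Int) := by push_cast; ring
      cases hj : PySem.Dict.get? last c with
      | none =>
        have hne : ¬ ((sn : Int) ≤ Option.getD (none : Option Int) (-1)) := by simp; omega
        rw [if_neg hne]
        rw [hcast]
        apply ih (i+1) sn _ hlast'
        · exact pv_startOk_keep bf i sn c hstart hiL hbfi
            (fun p hsp hpi => (hlast c).2 hj p hpi)
        · exact hdropS
      | some v =>
        obtain ⟨k, rfl, hk, hkc, hmax⟩ := (hlast c).1 v hj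
        simp only [Option.getD_some]
        rcases Nat.lt_or_ge k sn with hksn | hksn
        · rw [if_neg (by omega : ¬ (sn : Int) ≤ (k : Int))]
          rw [hcast]
          apply ih (i+1) sn _ hlast'
          · refine pv_startOk_keep bf i sn c hstart hiL hbfi (fun p hsp hpi hpc => ?_)
            exact hmax p (by omega) hpi hpc
          · exact hdropS
        · rw [if_pos (by omega : (sn : Int) ≤ (k : Int))]
          rw [hcast, show (k : Int) + 1 = ((k + 1 : Nat) : Int) by push_cast; ring]
          apply ih (i+1) (k+1) _ hlast'
          · exact pv_startOk_move bf i sn k c hstart hiL hbfi hksn hk hkc hmax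
          · exact hdropS

lemma pv_A_eq_spec (s : String) (m : Nat) :
    getIndexOfFirstNRepeating s (m : Int) = pvSpec s.toList m (s.toList.length - m) m := by
  show getIdxA_loop s.toList (PySem.List.pyRange (m : Int) (s.toList.length : Int) 1)
    (PySem.List.slice s.toList none (some (m : Int))) = _
  rw [PySem.List.slice_to_natCast]
  have hw : s.toList.take m = pvWin s.toList m m := by simp [pvWin]
  rw [hw]
  exact pv_A_loop s.toList m (s.toList.length - m) m rfl le_rfl

lemma pv_B_eq_spec (s : String) (m : Nat) :
    getIndexOfFirstNRepeating_alt s (m : Int) = pvSpec s.toList m s.toList.length 0 := by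
  show getIdxB_loop (m : Int) (PySem.List.enumerate s.toList 0) PySem.Dict.empty 0 = _
  have hl : pvLastOk s.toList 0 PySem.Dict.empty := by
    intro c
    constructor
    · intro v hv
      rw [PySem.Dict.get?_empty] at hv
      cases hv
    · intro _ j hj
      omega
  have hs : pvStartOk s.toList 0 0 := ⟨le_rfl, by simp, fun t ht => by omega⟩
  have h := pv_B_loop s.toList m s.toList 0 0 PySem.Dict.empty hl hs rfl
  simpa using h

-- ===== VERDICT (by name: the statement is the Claim_ definition above) =====
theorem getIndexOfFirstNRepeating_spec : Claim_equal_getIndexOfFirstNRepeating := by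
  intro s n _ hpre
  unfold Spec_getIndexOfFirstNRepeating
  obtain ⟨m, rfl⟩ : ∃ m : Nat, n = (m : Int) := ⟨n.toNat, (Int.toNat_of_nonneg hpre).symm⟩
  rw [pv_A_eq_spec, pv_B_eq_spec, pv_spec_skip s.toList m s.toList.length 0 (by omega) (by omega)]
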